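-- pv_equiv track=rewrite | github.com/wulymammoth/advent_of_code_2020 | python/day04.py | is_valid_height
-- ===== SOURCE A (Python) =====
-- def is_valid_height(height):
--     digits = []
--     for i, char in enumerate(height):
--         if char.isdigit():
--             digits.append(char)
--         elif char.isalpha():
--             if i < 2: # we must have '#' and at least two digits
--                 return False
--             suffix = height[i:]
--             if suffix not in ['cm', 'in']:
--                 return False
--             h = int(''.join(digits))
--             return 150 <= h <= 193 if suffix == 'cm' else 50 <= h <= 76
--         else: # non-alphanumeric
--             return False
--     return False
-- ===== SOURCE B (Python) =====
-- def is_valid_height(height):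
--     if height.endswith('cm'):
--         lo, hi = 150, 193
--     elif height.endswith('in'):
--         lo, hi = 50, 76
--     else:
--         return False
--     prefix = height[:-2]
--     if len(prefix) < 2 or not all(c.isdigit() for c in prefix):
--         return False
--     return lo <= int(prefix) <= hi
-- ===== Notes on version B (the rewrite author's own statement) =====
-- stated objective: idiomatic
-- what changed: Replaced A's left-to-right character state machine (accumulating digits and deciding at the first alphabetic character) by a suffix-directed decomposition: test which of the two unit suffixes the string ends with to pick the allowed range, then validate the remaining prefix as a digit block of length at least 2 and range-check its integer value.
import Mathlib
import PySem

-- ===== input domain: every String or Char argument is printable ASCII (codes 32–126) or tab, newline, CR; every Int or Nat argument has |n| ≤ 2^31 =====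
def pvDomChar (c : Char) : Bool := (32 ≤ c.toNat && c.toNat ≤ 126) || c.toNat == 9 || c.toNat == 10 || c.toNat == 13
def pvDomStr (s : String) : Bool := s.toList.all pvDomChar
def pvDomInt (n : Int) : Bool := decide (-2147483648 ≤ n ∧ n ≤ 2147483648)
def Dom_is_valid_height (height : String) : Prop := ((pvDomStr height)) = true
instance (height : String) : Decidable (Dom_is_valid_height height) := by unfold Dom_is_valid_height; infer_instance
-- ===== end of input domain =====

-- B replaces A's char-by-char scan with an accumulator by a unit-suffix test followed by
-- one validation of the digit prefix; objective: a more idiomatic decomposition.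

-- ===== PORT A =====
-- the for-loop over enumerate(height), with the loop index i and the accumulated digits
def isValidHeightLoop : List Char → Nat → List Char → Bool
  | [], _, _ => false
  | c :: rest, i, digits =>
    if PySem.Chars.isdigit c then
      isValidHeightLoop rest (i + 1) (digits ++ [c])
    else if PySem.Chars.isalpha c then
      if i < 2 then false
      else if !((c :: rest) == ['c', 'm'] || (c :: rest) == ['i', 'n']) then false
      else
        -- int(''.join(digits)): under the i ≥ 2 guard digits holds ≥ 2 digit chars,
        -- so ofChars? is some; the none branch is unreachable
        match PySem.Int.ofChars? digits with
        | some h =>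
          if (c :: rest) == ['c', 'm'] then decide (150 ≤ h ∧ h ≤ 193)
          else decide (50 ≤ h ∧ h ≤ 76)
        | none => false
    else false

def is_valid_height (height : String) : Bool :=
  isValidHeightLoop height.toList 0 []

-- ===== PORT B =====
-- lo <= int(prefix) <= hi after the length/digit guards (ofChars? is some there; none unreachable)
def altRangeCheck (cs : List Char) (lo hi : Int) : Bool :=
  let pre := PySem.Chars.slice cs none (some (-2))   -- height[:-2]
  if pre.length < 2 || !(pre.all PySem.Chars.isdigit) then false
  else
    match PySem.Int.ofChars? pre with
    | some h => decide (lo ≤ h ∧ h ≤ hi)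
    | none => false

def altCore (cs : List Char) : Bool :=
  if PySem.Chars.endswith cs ['c', 'm'] then altRangeCheck cs 150 193
  else if PySem.Chars.endswith cs ['i', 'n'] then altRangeCheck cs 50 76
  else false

def is_valid_height_alt (height : String) : Bool :=
  altCore height.toList

-- ===== PRECONDITION & SPEC =====
def Spec_is_valid_height (height : String) (out : Bool) : Prop := out = is_valid_height_alt height
instance (height : String) (out : Bool) : Decidable (Spec_is_valid_height height out) := by unfold Spec_is_valid_height; infer_instance

-- ===== CLAIM (what is proved, stated in full; the proofs are below) =====
def Claim_equal_is_valid_height : Prop := ∀ (height : String), Dom_is_valid_height height → Spec_is_valid_height height (is_valid_height height)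

-- ===== LEMMAS AND PROOFS =====

-- a string whose characters are all digits up to (possibly) the last one cannot end
-- with a two-char suffix whose first char is not a digit
lemma endswith_pair_false (l : List Char) (a b : Char)
    (h : ∀ x ∈ l.dropLast, PySem.Chars.isdigit x = true)
    (ha : PySem.Chars.isdigit a = false) :
    PySem.Chars.endswith l [a, b] = false := by
  cases hE : PySem.Chars.endswith l [a, b]
  · rfl
  · exfalso
    rw [PySem.Chars.endswith_iff] at hE
    obtain ⟨t, ht⟩ := hE
    have hmem : a ∈ l.dropLast := by
      rw [← ht]
      simp
    rw [h a hmem] at ha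
    cases ha

-- a two-element suffix test on a list ending in two explicit chars is an equality test
lemma endswith_pair (d : List Char) (c r a b : Char) :
    PySem.Chars.endswith (d ++ [c, r]) [a, b] = ((c == a) && (r == b)) := by
  have hdrop : (d ++ [c, r]).drop ((d ++ [c, r]).length - ([a, b] : List Char).length) = [c, r] := by
    have h1 : (d ++ [c, r]).length - ([a, b] : List Char).length = d.length := by
      simp
    rw [h1, List.drop_left]
  have hiff : PySem.Chars.endswith (d ++ [c, r]) [a, b] = true ↔ ([a, b] : List Char) = [c, r] := by
    rw [PySem.Chars.endswith_iff, List.suffix_iff_eq_drop, hdrop]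
  cases hE : PySem.Chars.endswith (d ++ [c, r]) [a, b]
  · have hne : ¬(([a, b] : List Char) = [c, r]) := fun he => by
      rw [hiff.mpr he] at hE; cases hE
    by_cases hca : c = a <;> by_cases hrb : r = b
    · exact (hne (by rw [hca, hrb])).elim
    · simp [hca, hrb]
    · simp [hca, hrb]
    · simp [hca, hrb]
  · have h2 := hiff.mp hE
    simp only [List.cons.injEq, and_true] at h2
    obtain ⟨rfl, rfl, -⟩ := h2
    simp

-- the central invariant: A's loop state (remaining chars; index = number of digits read;
-- the digit chars read so far) against B run on the whole string
lemma loop_eq_altCore (cs : List Char) :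
    ∀ d : List Char, (∀ x ∈ d, PySem.Chars.isdigit x = true) →
      isValidHeightLoop cs d.length d = altCore (d ++ cs) := by
  induction cs with
  | nil =>
    intro d hd
    have hcm : PySem.Chars.endswith d ['c', 'm'] = false :=
      endswith_pair_false d 'c' 'm' (fun x hx => hd x (List.dropLast_subset d hx)) (by decide)
    have hin : PySem.Chars.endswith d ['i', 'n'] = false :=
      endswith_pair_false d 'i' 'n' (fun x hx => hd x (List.dropLast_subset d hx)) (by decide)
    simp [isValidHeightLoop, altCore, hcm, hin]
  | cons c rest ih =>
    intro d hd
    by_cases hdig : PySem.Chars.isdigit c = true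
    · have hd' : ∀ x ∈ d ++ [c], PySem.Chars.isdigit x = true := by
        intro x hx
        rcases List.mem_append.mp hx with h | h
        · exact hd x h
        · simp at h; subst h; exact hdig
      have := ih (d ++ [c]) hd'
      simp only [isValidHeightLoop, hdig, if_true]
      simpa [List.append_assoc] using this
    · have hdig' : PySem.Chars.isdigit c = false := by
        revert hdig; cases PySem.Chars.isdigit c <;> simp
      match rest with
      | [] =>
        have hcm : PySem.Chars.endswith (d ++ [c]) ['c', 'm'] = false :=
          endswith_pair_false _ 'c' 'm' (by simpa using hd) (by decide)
        have hin : PySem.Chars.endswith (d ++ [c]) ['i', 'n'] = false :=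
          endswith_pair_false _ 'i' 'n' (by simpa using hd) (by decide)
        simp [isValidHeightLoop, hdig', altCore, hcm, hin]
      | [r] =>
        have hlist : d ++ [c, r] = d ++ c :: [r] := rfl
        have hall : d.all PySem.Chars.isdigit = true := List.all_eq_true.mpr hd
        have hpre : PySem.Chars.slice (d ++ [c, r]) none (some (-2)) = d := by
          rw [PySem.Chars.slice_eq_listSlice, PySem.List.slice_to_neg_ofNat _ 2 (by omega)]
          have h1 : (d ++ [c, r]).length - 2 = d.length := by simp
          rw [h1, List.take_left]
        by_cases hc : c = 'c' ∧ r = 'm'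
        · obtain ⟨rfl, rfl⟩ := hc
          rw [← hlist]
          simp only [altCore, endswith_pair, altRangeCheck, hpre]
          have halpha : PySem.Chars.isalpha 'c' = true := by decide
          by_cases h2 : d.length < 2
          · simp [isValidHeightLoop, hdig', h2, halpha]
          · simp [isValidHeightLoop, hdig', h2, hall, halpha]
        · by_cases hi : c = 'i' ∧ r = 'n'
          · obtain ⟨rfl, rfl⟩ := hi
            rw [← hlist]
            simp only [altCore, endswith_pair, altRangeCheck, hpre]
            have halpha : PySem.Chars.isalpha 'i' = true := by decide
            by_cases h2 : d.length < 2
            · simp [isValidHeightLoop, hdig', h2, halpha]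
            · simp [isValidHeightLoop, hdig', h2, hall, halpha]
          · rw [← hlist]
            simp only [altCore, endswith_pair]
            have hcm : ((c == 'c') && (r == 'm')) = false := by
              rcases not_and_or.mp hc with h | h <;> simp [h]
            have hin : ((c == 'i') && (r == 'n')) = false := by
              rcases not_and_or.mp hi with h | h <;> simp [h]
            have hm : ¬(c = 'c' ∧ r = 'm' ∧ True) := by
              intro ⟨h1, h2, _⟩; exact hc ⟨h1, h2⟩
            have hm2 : ¬(c = 'i' ∧ r = 'n' ∧ True) := by
              intro ⟨h1, h2, _⟩; exact hi ⟨h1, h2⟩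
            simp [isValidHeightLoop, hdig', hcm, hin]
      | r1 :: r2 :: t =>
        have hpre : PySem.Chars.slice (d ++ c :: r1 :: r2 :: t) none (some (-2)) =
            (d ++ [c]) ++ (r1 :: r2 :: t).take t.length := by
          rw [PySem.Chars.slice_eq_listSlice, PySem.List.slice_to_neg_ofNat _ 2 (by omega)]
          have h1 : d ++ c :: r1 :: r2 :: t = (d ++ [c]) ++ (r1 :: r2 :: t) := by simp
          have h2 : (d ++ c :: r1 :: r2 :: t).length - 2 = (d ++ [c]).length + t.length := by
            simp; omega
          rw [h2, h1]
          have h3 : d.length + 1 + t.length - d.length = t.length + 1 := by omega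
          simp [List.take_append, h3, List.take_of_length_le
            (by omega : d.length ≤ d.length + 1 + t.length), List.take_succ_cons]
        have hallf : ∀ lo hi : Int, altRangeCheck (d ++ c :: r1 :: r2 :: t) lo hi = false := by
          intro lo hi
          have hcmem : c ∈ PySem.Chars.slice (d ++ c :: r1 :: r2 :: t) none (some (-2)) := by
            rw [hpre]; simp
          have hna : (PySem.Chars.slice (d ++ c :: r1 :: r2 :: t) none (some (-2))).all
              PySem.Chars.isdigit = false := by
            rcases h : (PySem.Chars.slice (d ++ c :: r1 :: r2 :: t) none (some (-2))).all
                PySem.Chars.isdigit with _ | _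
            · rfl
            · rw [List.all_eq_true] at h
              rw [h c hcmem] at hdig'; cases hdig'
          simp only [altRangeCheck]
          rw [hna]
          simp
        have hm : ¬(c = 'c' ∧ r1 = 'm' ∧ r2 :: t = ([] : List Char)) := by
          intro ⟨_, _, h3⟩; cases h3
        have hm2 : ¬(c = 'i' ∧ r1 = 'n' ∧ r2 :: t = ([] : List Char)) := by
          intro ⟨_, _, h3⟩; cases h3
        simp [isValidHeightLoop, hdig', altCore, hallf]

-- ===== VERDICT (by name: the statement is the Claim_ definition above) =====
theorem is_valid_height_spec : Claim_equal_is_valid_height := by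
  intro height _
  unfold Spec_is_valid_height is_valid_height is_valid_height_alt
  simpa using loop_eq_altCore height.toList [] (by simp)
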